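-- pv_equiv track=rewrite | github.com/RayBop/ML-Algos-Written-From-Scratch | HW2/decisionTree.py | count_vals
-- ===== SOURCE A (Python) =====
-- def count_vals(data, vals):
--
--     i = 0
--     v0,v1=0,0
--     for row in data:
--         if i==0:
--             i+=1
--             continue
--
--         row_array = row.split(",")
--         if row_array[len(row_array)-1] == vals[0]:
--             v0 += 1
--         else:
--             v1 += 1
--     return v0,v1
-- ===== SOURCE B (Python) =====
-- def count_vals(data, vals):
--     rows = list(data)[1:]
--     counts = {}
--     for row in rows:
--         key = row.split(",")[-1]
--         counts[key] = counts.get(key, 0) + 1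
--     if not rows:
--         return 0, 0
--     v0 = counts.get(vals[0], 0)
--     return v0, len(rows) - v0
-- ===== Notes on version B (the rewrite author's own statement) =====
-- stated objective: alternative
-- what changed: B builds a frequency dictionary (histogram) of the rows' last comma-separated fields in one pass, then answers with a single lookup counts.get(vals[0], 0) and derives the non-matching count by subtraction from the row count, instead of comparing each row against vals[0] and maintaining two counters with an index flag.
import Mathlib
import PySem

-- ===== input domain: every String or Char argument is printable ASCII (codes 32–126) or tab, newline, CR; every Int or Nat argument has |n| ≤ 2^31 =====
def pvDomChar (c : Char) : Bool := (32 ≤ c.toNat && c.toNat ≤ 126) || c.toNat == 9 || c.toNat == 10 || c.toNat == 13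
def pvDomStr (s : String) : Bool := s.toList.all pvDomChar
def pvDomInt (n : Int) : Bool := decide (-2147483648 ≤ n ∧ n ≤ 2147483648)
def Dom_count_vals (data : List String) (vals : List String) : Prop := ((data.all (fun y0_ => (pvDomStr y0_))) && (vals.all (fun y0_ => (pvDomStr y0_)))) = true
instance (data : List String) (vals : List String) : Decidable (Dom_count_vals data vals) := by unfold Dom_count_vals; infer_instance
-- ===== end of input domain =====

-- B replaces A's two running counters with a frequency dictionary of the last fields,
-- answered by a single lookup plus subtraction (alternative decomposition, same cost).

-- ===== PORT A =====
-- A: index flag i, two counters; vals[0] is ported with `.getD ""` — inside Pre_ the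
-- lookup is always `some` (vals ≠ [] whenever the loop body runs), so this is exact there.
def count_vals (data : List String) (vals : List String) : Int × Int :=
  let st := data.foldl (fun (st : Int × Int × Int) row =>
    if st.1 == 0 then (st.1 + 1, st.2.1, st.2.2)
    else
      let rowArray := (PySem.Str.split? row ",").getD []
      if (PySem.List.pyGet? rowArray ((rowArray.length : Int) - 1)).getD ""
           == (PySem.List.pyGet? vals 0).getD ""
      then (st.1, st.2.1 + 1, st.2.2)
      else (st.1, st.2.1, st.2.2 + 1)) (0, 0, 0)
  (st.2.1, st.2.2)

-- ===== PORT B =====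
-- B: histogram of last fields, then one lookup; vals[0] is only reached when rows ≠ []
-- (inside Pre_ the lookup is then `some`, so `.getD ""` is exact).
def count_vals_alt (data : List String) (vals : List String) : Int × Int :=
  let rows := PySem.List.slice data (some 1) none
  let counts := rows.foldl (fun (d : PySem.Dict String Int) row =>
      let key := (PySem.List.pyGet? ((PySem.Str.split? row ",").getD []) (-1)).getD ""
      d.insert key (d.getD key 0 + 1)) PySem.Dict.empty
  if rows.isEmpty then (0, 0)
  else
    let v0 := counts.getD ((PySem.List.pyGet? vals 0).getD "") 0
    (v0, (rows.length : Int) - v0)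

-- ===== PRECONDITION & SPEC =====
-- Pre_ excludes exactly the inputs where Python A raises IndexError on vals[0]:
-- vals = [] while data has at least one body row (B raises there too).
def Pre_count_vals (data : List String) (vals : List String) : Prop :=
  vals ≠ [] ∨ data.length ≤ 1
instance (data : List String) (vals : List String) : Decidable (Pre_count_vals data vals) := by
  unfold Pre_count_vals; infer_instance
def pvWitness_count_vals : List String × List String := (["header", "a,1", "b,2"], ["1"])
def Spec_count_vals (data : List String) (vals : List String) (out : Int × Int) : Prop := out = count_vals_alt data vals
instance (data : List String) (vals : List String) (out : Int × Int) : Decidable (Spec_count_vals data vals out) := by unfold Spec_count_vals; infer_instance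

-- ===== CLAIM (what is proved, stated in full; the proofs are below) =====
def Claim_equal_count_vals : Prop := ∀ (data : List String) (vals : List String), Dom_count_vals data vals → Pre_count_vals data vals → Spec_count_vals data vals (count_vals data vals)

-- ===== LEMMAS AND PROOFS =====

-- the last field of a row, as both ports compute it (A via len-1, B via -1; equal below)
def lastField (row : String) : String :=
  (PySem.List.pyGet? ((PySem.Str.split? row ",").getD []) (-1)).getD ""

-- split(",") never yields the empty list
lemma splitOn_go_ne_nil (sep : List Char) (fuel : Nat) :
    ∀ (l cur : List Char) (acc : List (List Char)),
      PySem.Chars.splitOn.go sep fuel l cur acc ≠ [] := by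
  induction fuel with
  | zero => intro l cur acc; simp [PySem.Chars.splitOn.go]
  | succ n ih =>
    intro l cur acc
    cases l with
    | nil => simp [PySem.Chars.splitOn.go]
    | cons c rest =>
      rw [PySem.Chars.splitOn.go]
      split
      · exact ih _ _ _
      · exact ih _ _ _

lemma split_ne_nil (row : String) : (PySem.Str.split? row ",").getD [] ≠ [] := by
  simp only [PySem.Str.split?, PySem.Chars.split?, PySem.Chars.splitOn]
  split
  · simp_all
  · simp only [Option.getD_some, Option.map_some]
    intro h
    exact splitOn_go_ne_nil _ _ _ _ _ (by simpa using h)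

-- A indexes the last field as arr[len(arr)-1], B as arr[-1]: same element (arr ≠ []).
lemma last_idx_eq (xs : List String) (h : xs ≠ []) :
    PySem.List.pyGet? xs ((xs.length : Int) - 1) = PySem.List.pyGet? xs (-1) := by
  have hl : 1 ≤ xs.length := List.length_pos_of_ne_nil h
  have : ((xs.length : Int) - 1) = ((xs.length - 1 : Nat) : Int) := by omega
  rw [this, PySem.List.pyGet?_natCast, PySem.List.pyGet?_neg_one,
      List.getLast?_eq_getElem?]

-- A's if-condition is equality of lastField with the target
lemma cond_eq (row : String) (vals : List String) :
    ((PySem.List.pyGet? ((PySem.Str.split? row ",").getD [])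
        (((((PySem.Str.split? row ",").getD []).length : Int)) - 1)).getD ""
       == (PySem.List.pyGet? vals 0).getD "")
    = (lastField row == (PySem.List.pyGet? vals 0).getD "") := by
  unfold lastField
  rw [last_idx_eq _ (split_ne_nil row)]

-- A's tail loop (flag already 1): counts matches of lastField against the target
lemma afold_tail (vals : List String) (t : List String) :
    ∀ (v0 v1 : Int),
      t.foldl (fun (st : Int × Int × Int) row =>
        if st.1 == 0 then (st.1 + 1, st.2.1, st.2.2)
        else
          if (PySem.List.pyGet? ((PySem.Str.split? row ",").getD [])
                ((((PySem.Str.split? row ",").getD []).length : Int) - 1)).getD ""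
               == (PySem.List.pyGet? vals 0).getD ""
          then (st.1, st.2.1 + 1, st.2.2)
          else (st.1, st.2.1, st.2.2 + 1)) (1, v0, v1)
      = (1,
         v0 + ((t.countP (fun row => lastField row == (PySem.List.pyGet? vals 0).getD "") : Nat) : Int),
         v1 + ((t.length : Int)
               - ((t.countP (fun row => lastField row == (PySem.List.pyGet? vals 0).getD "") : Nat) : Int))) := by
  induction t with
  | nil => intro v0 v1; simp
  | cons h t ih =>
    intro v0 v1
    simp only [List.foldl_cons, List.countP_cons, List.length_cons]
    rw [cond_eq h vals, show ((1:Int) == 0) = false by decide]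
    simp only [Bool.false_eq_true, if_false]
    by_cases hc : (lastField h == (PySem.List.pyGet? vals 0).getD "") = true
    · rw [if_pos hc, ih (v0 + 1) v1, hc]
      refine Prod.ext rfl (Prod.ext ?_ ?_) <;> (simp; try ring)
    · rw [if_neg hc, ih v0 (v1 + 1)]
      rw [Bool.not_eq_true] at hc
      rw [hc]
      refine Prod.ext rfl (Prod.ext ?_ ?_) <;> (simp; try ring)

-- B's histogram looked up at the target is the number of matching rows
lemma counts_getD (rows : List String) (target : String) :
    (rows.foldl (fun (d : PySem.Dict String Int) row =>
        let key := (PySem.List.pyGet? ((PySem.Str.split? row ",").getD []) (-1)).getD ""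
        d.insert key (d.getD key 0 + 1)) PySem.Dict.empty).getD target 0
      = ((rows.countP (fun row => lastField row == target) : Nat) : Int) := by
  have h1 : (rows.foldl (fun (d : PySem.Dict String Int) row =>
        let key := (PySem.List.pyGet? ((PySem.Str.split? row ",").getD []) (-1)).getD ""
        d.insert key (d.getD key 0 + 1)) PySem.Dict.empty)
      = PySem.Dict.counter (rows.map lastField) := by
    rw [← PySem.Dict.foldl_insert_getD_add_one_eq_counter, List.foldl_map]
    rfl
  rw [h1, PySem.Dict.getD_counter, List.count_eq_countP, List.countP_map]
  rfl

-- ===== VERDICT (by name: the statement is the Claim_ definition above) =====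
theorem count_vals_spec : Claim_equal_count_vals := by
  intro data vals _ _
  unfold Spec_count_vals count_vals count_vals_alt
  cases data with
  | nil => simp [PySem.List.slice]
  | cons h t =>
    simp only [List.foldl_cons, PySem.List.slice_from_one, List.tail_cons]
    rw [show ((0:Int) == 0) = true by decide]
    simp only [if_true, show (0:Int) + 1 = 1 from by norm_num]
    rw [afold_tail]
    cases t with
    | nil => simp
    | cons r rs =>
      simp only [List.isEmpty_cons, Bool.false_eq_true, if_false]
      rw [counts_getD]
      simp
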